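-- pv_equiv track=rewrite | github.com/Xiaohao-Liu/slime | slime/backends/megatron_utils/megatron_to_hf/processors/quantizer_fp8.py | _is_module_skipped
-- ===== SOURCE A (Python) =====
-- def _is_module_skipped(weight_name, modules_to_not_convert):
--     if not modules_to_not_convert:
--         return False
--     base = weight_name
--     for suffix in (".weight_scale_inv", ".weight_scale", ".weight", ".bias"):
--         if base.endswith(suffix):
--             base = base[: -len(suffix)]
--             break
--     for entry in modules_to_not_convert:
--         if base == entry or base.startswith(entry + "."):
--             return True
--     return False
-- ===== SOURCE B (Python) =====
-- _SUFFIXES = (".weight_scale_inv", ".weight_scale", ".weight", ".bias")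
--
--
-- def _is_module_skipped(weight_name, modules_to_not_convert):
--     base = next(
--         (weight_name[: -len(s)] for s in _SUFFIXES if weight_name.endswith(s)),
--         weight_name,
--     )
--     skip = set(modules_to_not_convert)
--     prefix = ""
--     for ch in base:
--         if ch == "." and prefix in skip:
--             return True
--         prefix += ch
--     return prefix in skip
-- ===== Notes on version B (the rewrite author's own statement) =====
-- stated objective: alternative
-- what changed: B strips the suffix by picking the first match from a suffix tuple with next(...) instead of a loop-with-break, then replaces A's scan over every skip-list entry by building a set once and walking base's characters, testing each dotted ancestor prefix for set membership.
import Mathlib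
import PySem

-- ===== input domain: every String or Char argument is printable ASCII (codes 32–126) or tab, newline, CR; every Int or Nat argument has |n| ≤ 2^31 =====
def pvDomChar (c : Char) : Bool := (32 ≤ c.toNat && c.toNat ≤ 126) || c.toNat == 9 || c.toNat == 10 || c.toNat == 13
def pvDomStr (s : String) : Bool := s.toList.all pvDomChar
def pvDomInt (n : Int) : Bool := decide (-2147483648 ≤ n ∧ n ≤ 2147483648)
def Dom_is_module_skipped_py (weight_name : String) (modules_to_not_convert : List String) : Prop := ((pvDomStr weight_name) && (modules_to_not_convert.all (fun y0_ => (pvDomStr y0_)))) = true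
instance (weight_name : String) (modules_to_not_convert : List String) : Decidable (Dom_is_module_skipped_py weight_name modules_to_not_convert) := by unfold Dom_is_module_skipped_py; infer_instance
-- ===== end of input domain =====

-- B strips the suffix by first-match over a suffix list and replaces A's per-entry scan by one set lookup per dotted ancestor prefix of base (objective: alternative).

-- ===== PORT A =====
-- the suffix-stripping loop with break: first matching suffix wins (literal nested ifs)
def pvStripA (base : List Char) : List Char :=
  if PySem.Chars.endswith base ".weight_scale_inv".toList then PySem.Chars.slice base none (some (-17))
  else if PySem.Chars.endswith base ".weight_scale".toList then PySem.Chars.slice base none (some (-13))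
  else if PySem.Chars.endswith base ".weight".toList then PySem.Chars.slice base none (some (-7))
  else if PySem.Chars.endswith base ".bias".toList then PySem.Chars.slice base none (some (-5))
  else base

-- for entry in modules_to_not_convert: if base == entry or base.startswith(entry + "."): return True
def pvEntriesLoop (base : List Char) : List String → Bool
  | [] => false
  | e :: rest =>
      if base = e.toList ∨ PySem.Chars.startswith base (e.toList ++ ['.']) then true
      else pvEntriesLoop base rest

def is_module_skipped_py (weight_name : String) (modules_to_not_convert : List String) : Bool :=
  if modules_to_not_convert.isEmpty then false
  else pvEntriesLoop (pvStripA weight_name.toList) modules_to_not_convert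

-- ===== PORT B =====
-- _SUFFIXES, and next((weight_name[:-len(s)] for s in _SUFFIXES if weight_name.endswith(s)), weight_name):
-- first suffix that matches yields the truncation (w[:-k] = take (len-k)); default is weight_name itself
def pvSuffixes : List (List Char) :=
  [".weight_scale_inv".toList, ".weight_scale".toList, ".weight".toList, ".bias".toList]

def pvStripB : List (List Char) → List Char → List Char
  | [], w => w
  | s :: rest, w =>
      if PySem.Chars.endswith w s then w.take (w.length - s.length) else pvStripB rest w

-- for ch in base: if ch == "." and prefix in skip: return True; prefix += ch — then prefix in skip
def pvPrefixLoop (skip : PySem.Set (List Char)) (pre : List Char) : List Char → Bool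
  | [] => PySem.Set.contains skip pre
  | c :: rest =>
      if c = '.' ∧ PySem.Set.contains skip pre then true
      else pvPrefixLoop skip (pre ++ [c]) rest

def is_module_skipped_py_alt (weight_name : String) (modules_to_not_convert : List String) : Bool :=
  let base := pvStripB pvSuffixes weight_name.toList
  let skip : PySem.Set (List Char) := PySem.Set.ofList (modules_to_not_convert.map String.toList)
  pvPrefixLoop skip [] base

-- ===== PRECONDITION & SPEC =====
def Spec_is_module_skipped_py (weight_name : String) (modules_to_not_convert : List String) (out : Bool) : Prop := out = is_module_skipped_py_alt weight_name modules_to_not_convert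
instance (weight_name : String) (modules_to_not_convert : List String) (out : Bool) : Decidable (Spec_is_module_skipped_py weight_name modules_to_not_convert out) := by unfold Spec_is_module_skipped_py; infer_instance

-- ===== CLAIM (what is proved, stated in full; the proofs are below) =====
def Claim_equal_is_module_skipped_py : Prop := ∀ (weight_name : String) (modules_to_not_convert : List String), Dom_is_module_skipped_py weight_name modules_to_not_convert → Spec_is_module_skipped_py weight_name modules_to_not_convert (is_module_skipped_py weight_name modules_to_not_convert)

-- ===== LEMMAS AND PROOFS =====

-- the two suffix-strippers agree: each of A's negative slices is B's take (len - k)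
lemma pvStrip_eq (w : List Char) : pvStripA w = pvStripB pvSuffixes w := by
  simp only [pvStripA, pvStripB, pvSuffixes, PySem.Chars.slice_eq_listSlice]
  rw [PySem.List.slice_to_neg_ofNat w 17 (by omega),
      PySem.List.slice_to_neg_ofNat w 13 (by omega),
      PySem.List.slice_to_neg_ofNat w 7 (by omega),
      PySem.List.slice_to_neg_ofNat w 5 (by omega)]
  rfl

-- A's per-entry test characterised: entry is a dotted ancestor prefix of base
lemma pvMatch_iff (base e : List Char) :
    (base = e ∨ PySem.Chars.startswith base (e ++ ['.']) = true) ↔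
      (e = base ∨ ∃ u v, base = u ++ '.' :: v ∧ e = u) := by
  rw [PySem.Chars.startswith_iff]
  constructor
  · rintro (h | ⟨t, ht⟩)
    · exact Or.inl h.symm
    · exact Or.inr ⟨e, t, by simpa using ht.symm, rfl⟩
  · rintro (h | ⟨u, v, hb, he⟩)
    · exact Or.inl h.symm
    · subst he; exact Or.inr ⟨v, by simpa using hb.symm⟩

lemma pvEntriesLoop_iff (base : List Char) (mods : List String) :
    pvEntriesLoop base mods = true ↔
      ∃ e ∈ mods, e.toList = base ∨ ∃ u v, base = u ++ '.' :: v ∧ e.toList = u := by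
  induction mods with
  | nil => simp [pvEntriesLoop]
  | cons e rest ih =>
    simp only [pvEntriesLoop]
    split_ifs with h
    · simp only [true_iff]
      exact ⟨e, List.mem_cons_self .., (pvMatch_iff base e.toList).mp h⟩
    · rw [ih]
      constructor
      · rintro ⟨m, hm, hmm⟩; exact ⟨m, List.mem_cons_of_mem _ hm, hmm⟩
      · rintro ⟨m, hm, hmm⟩
        rcases List.mem_cons.mp hm with rfl | hm'
        · exact absurd ((pvMatch_iff base m.toList).mpr hmm) h
        · exact ⟨m, hm', hmm⟩

lemma pvSet_contains_iff (S : PySem.Set (List Char)) (x : List Char) :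
    PySem.Set.contains S x = true ↔ x ∈ S := by
  simp [PySem.Set.contains]

-- B's loop characterised: true iff some element of skip is a dotted ancestor prefix of pre ++ rest
lemma pvPrefixLoop_iff (S : PySem.Set (List Char)) :
    ∀ (rest pre : List Char),
      pvPrefixLoop S pre rest = true ↔
        ∃ m ∈ S, m = pre ++ rest ∨ ∃ u v, rest = u ++ '.' :: v ∧ m = pre ++ u := by
  intro rest
  induction rest with
  | nil =>
    intro pre
    simp [pvPrefixLoop, PySem.Set.contains]
  | cons c rs ih =>
    intro pre
    simp only [pvPrefixLoop]
    split_ifs with h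
    · obtain ⟨hc, hm⟩ := h
      simp only [true_iff]
      exact ⟨pre, (pvSet_contains_iff S pre).mp hm, Or.inr ⟨[], rs, by simp [hc], by simp⟩⟩
    · rw [ih]
      constructor
      · rintro ⟨m, hm, rfl | ⟨u, v, hrs, rfl⟩⟩
        · exact ⟨pre ++ [c] ++ rs, hm, Or.inl (by simp)⟩
        · exact ⟨pre ++ [c] ++ u, hm, Or.inr ⟨c :: u, v, by simp [hrs], by simp⟩⟩
      · rintro ⟨m, hm, rfl | ⟨u, v, huv, rfl⟩⟩
        · exact ⟨pre ++ c :: rs, hm, Or.inl (by simp)⟩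
        · cases u with
          | nil =>
            simp only [List.nil_append] at huv
            obtain ⟨hc, _⟩ := List.cons.inj huv
            exact absurd ⟨hc, by simpa [pvSet_contains_iff] using hm⟩ h
          | cons c' u' =>
            simp only [List.cons_append] at huv
            obtain ⟨hc, hrs⟩ := List.cons.inj huv
            subst hc
            exact ⟨pre ++ c :: u', hm, Or.inr ⟨u', v, hrs, by simp⟩⟩

lemma pvPrefixLoop_empty : ∀ (rest pre : List Char), pvPrefixLoop [] pre rest = false := by
  intro rest
  induction rest with
  | nil => intro pre; simp [pvPrefixLoop, PySem.Set.contains]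
  | cons c rs ih => intro pre; simp [pvPrefixLoop, PySem.Set.contains, ih]

lemma pvMain (base : List Char) (mods : List String) :
    pvEntriesLoop base mods = pvPrefixLoop (PySem.Set.ofList (mods.map String.toList)) [] base := by
  rw [Bool.eq_iff_iff, pvEntriesLoop_iff, pvPrefixLoop_iff]
  constructor
  · rintro ⟨e, he, hmm⟩
    refine ⟨e.toList, ?_, by simpa using hmm⟩
    rw [PySem.Set.mem_ofList]
    exact List.mem_map_of_mem he
  · rintro ⟨m, hm, hmm⟩
    rw [PySem.Set.mem_ofList] at hm
    obtain ⟨e, he, rfl⟩ := List.mem_map.mp hm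
    exact ⟨e, he, by simpa using hmm⟩

-- ===== VERDICT (by name: the statement is the Claim_ definition above) =====
theorem is_module_skipped_py_spec : Claim_equal_is_module_skipped_py := by
  intro w mods _
  unfold Spec_is_module_skipped_py is_module_skipped_py is_module_skipped_py_alt
  by_cases hmods : mods.isEmpty
  · rw [List.isEmpty_iff] at hmods
    subst hmods
    simp [pvPrefixLoop_empty, PySem.Set.ofList]
  · rw [if_neg hmods, ← pvStrip_eq]
    exact pvMain (pvStripA w.toList) mods
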